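-- pv_equiv track=rewrite | github.com/nicocastx/TPSSIM | TP2/utilidades/logicaDistribuciones.py | contadorIntervalos
-- ===== SOURCE A (Python) =====
-- def contadorIntervalos(serie, intervalos):
--     contadores_intervalos = [0] * len(intervalos)
--     maxSerie = max(serie)
--
--     for numero in serie:
--         for i, intervalo in enumerate(intervalos):
--             if intervalo[0] <= numero < intervalo[1]:
--                 contadores_intervalos[i] += 1
--                 break
--             if numero == maxSerie:
--                 contadores_intervalos[-1] += 1
--                 break
--     return contadores_intervalos
-- ===== SOURCE B (Python) =====
-- def contadorIntervalos(serie, intervalos):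
--     maxSerie = max(serie)
--     contadores = [0] * len(intervalos)
--     if not intervalos:
--         return contadores
--     pendientes = serie
--     for i, (lo, hi) in enumerate(intervalos):
--         dentro = [v for v in pendientes if lo <= v < hi]
--         contadores[i] = len(dentro)
--         pendientes = [v for v in pendientes if not (lo <= v < hi)]
--     # the maximum closes the last half-open interval: count it there when unmatched
--     contadores[-1] += sum(1 for v in pendientes if v == maxSerie)
--     return contadores
-- ===== Notes on version B (the rewrite author's own statement) =====
-- stated objective: alternative
-- what changed: A scans the intervals per value, mutating a counter array with two break conditions; B sieves interval-by-interval (filter matching values out of the remaining list per interval) and then counts the leftover copies of the maximum into the last bucket.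
-- intended difference: When the series maximum misses the first interval but its first matching interval is not the last one, A counts every copy of the maximum in the last bucket (its max-check fires right after interval 0 fails) while B counts it in its matching interval, which is the intended histogram behaviour. — e.g. on contadorIntervalos([5], [(0, 1), (4, 6), (9, 10)]): A returns [0, 0, 1], B returns [0, 1, 0]
import Mathlib
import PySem

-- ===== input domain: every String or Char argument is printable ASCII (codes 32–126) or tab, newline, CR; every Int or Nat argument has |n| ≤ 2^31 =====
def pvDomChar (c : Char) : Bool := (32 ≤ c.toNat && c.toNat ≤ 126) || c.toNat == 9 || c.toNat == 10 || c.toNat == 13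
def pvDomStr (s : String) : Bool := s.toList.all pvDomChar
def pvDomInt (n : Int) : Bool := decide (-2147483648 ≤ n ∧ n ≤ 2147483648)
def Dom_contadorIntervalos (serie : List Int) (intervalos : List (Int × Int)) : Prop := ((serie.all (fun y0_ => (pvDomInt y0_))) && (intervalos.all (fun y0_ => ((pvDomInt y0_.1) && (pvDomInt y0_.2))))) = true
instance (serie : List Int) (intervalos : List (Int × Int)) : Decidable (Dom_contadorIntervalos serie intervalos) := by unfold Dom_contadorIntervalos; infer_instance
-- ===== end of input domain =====

-- B replaces A's per-value scan of the interval list by an interval-major sieve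
-- (filter the matching values out of the remaining list, one interval at a time),
-- then counts the leftover copies of the maximum into the last bucket; objective: alternative.

-- 'lo <= v < hi', the membership test both programs write inline
def pvIn (lo hi v : Int) : Bool := decide (lo ≤ v) && decide (v < hi)

-- ===== PORT A =====
-- A's inner 'for i, intervalo in enumerate(intervalos): … break' loop, recursion over the
-- remaining intervals carrying the enumerate index i; 'contadores_intervalos[-1] += 1' is an
-- update at position length-1 (the list is nonempty whenever that branch is reachable).
def pvLoopA (maxSerie : Int) (rest : List (Int × Int)) (i : Nat) (cont : List Int) (numero : Int) : List Int :=
  match rest with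
  | [] => cont
  | (lo, hi) :: t =>
    if pvIn lo hi numero then cont.set i (cont.getD i 0 + 1)
    else if numero = maxSerie then cont.set (cont.length - 1) (cont.getD (cont.length - 1) 0 + 1)
    else pvLoopA maxSerie t (i + 1) cont numero

def contadorIntervalos (serie : List Int) (intervalos : List (Int × Int)) : List Int :=
  -- max(serie): PySem.List.max?; Python raises ValueError on [] — excluded by Pre_
  let maxSerie := (PySem.List.max? serie (fun y => y)).getD 0
  serie.foldl (fun cont numero => pvLoopA maxSerie intervalos 0 cont numero)
    (List.replicate intervalos.length 0)

-- ===== PORT B =====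
-- Source B's 'for i, (lo, hi) in enumerate(intervalos)' sieve loop: per interval, the matching
-- values of 'pendientes' are counted into slot i and filtered out; returns (contadores, pendientes)
def pvSieve (rest : List (Int × Int)) (i : Nat) (pendientes : List Int) (contadores : List Int) :
    List Int × List Int :=
  match rest with
  | [] => (contadores, pendientes)
  | (lo, hi) :: t =>
    let dentro := pendientes.filter (fun v => pvIn lo hi v)
    let contadores' := contadores.set i (dentro.length : Int)
    let pendientes' := pendientes.filter (fun v => ! pvIn lo hi v)
    pvSieve t (i + 1) pendientes' contadores'

def contadorIntervalos_alt (serie : List Int) (intervalos : List (Int × Int)) : List Int :=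
  let maxSerie := (PySem.List.max? serie (fun y => y)).getD 0
  let contadores := List.replicate intervalos.length (0 : Int)
  if intervalos.isEmpty then contadores
  else
    let r := pvSieve intervalos 0 serie contadores
    -- 'contadores[-1] += sum(1 for v in pendientes if v == maxSerie)'
    r.1.set (r.1.length - 1)
      (r.1.getD (r.1.length - 1) 0 + (r.2.countP (fun v => v == maxSerie) : Int))

-- ===== PRECONDITION & SPEC =====
-- Pre_ excludes serie = [], on which Python's max(serie) raises ValueError in both A and B.
def Pre_contadorIntervalos (serie : List Int) (intervalos : List (Int × Int)) : Prop := serie ≠ []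
instance (serie : List Int) (intervalos : List (Int × Int)) : Decidable (Pre_contadorIntervalos serie intervalos) := by unfold Pre_contadorIntervalos; infer_instance
def pvWitness_contadorIntervalos : List Int × (List (Int × Int)) := ([1, 3, 3], [(0, 2), (2, 3)])

-- When the series maximum misses the first interval but its first matching interval is not the
-- last one, A counts every copy of the maximum in the last bucket (its max-check fires right
-- after interval 0 fails) while B counts it in its matching interval, the intended behaviour.
def D_contadorIntervalos (serie : List Int) (intervalos : List (Int × Int)) : Prop :=
  ((intervalos.findIdx? fun q =>
      decide (q.1 ≤ serie.max?.getD 0 ∧ serie.max?.getD 0 < q.2)).any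
    fun f => decide (0 < f ∧ f + 1 < intervalos.length)) = true
instance (serie : List Int) (intervalos : List (Int × Int)) : Decidable (D_contadorIntervalos serie intervalos) := by unfold D_contadorIntervalos; infer_instance

def Spec_contadorIntervalos (serie : List Int) (intervalos : List (Int × Int)) (out : List Int) : Prop := ¬ D_contadorIntervalos serie intervalos → out = contadorIntervalos_alt serie intervalos
instance (serie : List Int) (intervalos : List (Int × Int)) (out : List Int) : Decidable (Spec_contadorIntervalos serie intervalos out) := by unfold Spec_contadorIntervalos; infer_instance

def pvDiffWitness_contadorIntervalos : List Int × (List (Int × Int)) := ([5], [(0, 1), (4, 6), (9, 10)])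
def pvDiffWitnessOut_contadorIntervalos : (List Int) × (List Int) := ([0, 0, 1], [0, 1, 0])

-- ===== CLAIM (what is proved, stated in full; the proofs are below) =====
def Claim_unchanged_contadorIntervalos : Prop := ∀ (serie : List Int) (intervalos : List (Int × Int)), Dom_contadorIntervalos serie intervalos → Pre_contadorIntervalos serie intervalos → Spec_contadorIntervalos serie intervalos (contadorIntervalos serie intervalos)
def Claim_changed_contadorIntervalos : Prop := Dom_contadorIntervalos (pvDiffWitness_contadorIntervalos.1) (pvDiffWitness_contadorIntervalos.2) ∧ Pre_contadorIntervalos (pvDiffWitness_contadorIntervalos.1) (pvDiffWitness_contadorIntervalos.2) ∧ D_contadorIntervalos (pvDiffWitness_contadorIntervalos.1) (pvDiffWitness_contadorIntervalos.2) ∧ contadorIntervalos (pvDiffWitness_contadorIntervalos.1) (pvDiffWitness_contadorIntervalos.2) = pvDiffWitnessOut_contadorIntervalos.1 ∧ contadorIntervalos_alt (pvDiffWitness_contadorIntervalos.1) (pvDiffWitness_contadorIntervalos.2) = pvDiffWitnessOut_contadorIntervalos.2 ∧ pvDiffWitnessOut_contadorIntervalos.1 ≠ pvDiffWitnessOut_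contadorIntervalos.2
def Claim_exact_contadorIntervalos : Prop := ∀ (serie : List Int) (intervalos : List (Int × Int)), Dom_contadorIntervalos serie intervalos → Pre_contadorIntervalos serie intervalos → D_contadorIntervalos serie intervalos → contadorIntervalos serie intervalos ≠ contadorIntervalos_alt serie intervalos

-- ===== LEMMAS AND PROOFS =====

-- first-match index: which bucket a value falls into, ignoring the max rule (proof-side)
def pvFm : List (Int × Int) → Int → Option Nat
  | [], _ => none
  | (lo, hi) :: t, v => if pvIn lo hi v then some 0 else (pvFm t v).map (· + 1)

-- the bucket A's inner loop assigns to v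
def pvBucketA (M : Int) (ivs : List (Int × Int)) (v : Int) : Option Nat :=
  match ivs with
  | [] => none
  | (lo, hi) :: t =>
    if pvIn lo hi v then some 0
    else if v = M then some (ivs.length - 1)
    else (pvFm t v).map (· + 1)

-- D_ is phrased with library functions; bridge them to the proof-side helpers
theorem maxM_eq (serie : List Int) :
    serie.max?.getD 0 = (PySem.List.max? serie (fun y => y)).getD 0 := by
  cases serie with
  | nil => simp [PySem.List.max?]
  | cons x t => rw [PySem.List.max?_id_cons]; rfl

theorem fm_eq_findIdx (ivs : List (Int × Int)) (v : Int) :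
    (ivs.findIdx? fun q => decide (q.1 ≤ v ∧ v < q.2)) = pvFm ivs v := by
  induction ivs with
  | nil => simp [pvFm]
  | cons q t ih =>
    obtain ⟨lo, hi⟩ := q
    rw [List.findIdx?_cons, ih]
    simp only [pvFm]
    by_cases h : lo ≤ v ∧ v < hi
    · simp [pvIn, h]
    · simp [pvIn, h]

theorem pvFm_lt {ivs : List (Int × Int)} {v : Int} {f : Nat} (h : pvFm ivs v = some f) :
    f < ivs.length := by
  induction ivs generalizing f with
  | nil => simp [pvFm] at h
  | cons p t ih =>
    obtain ⟨lo, hi⟩ := p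
    simp only [pvFm] at h
    split at h
    · injection h with h
      simp only [List.length_cons]
      omega
    · rcases hft : pvFm t v with _ | g <;> rw [hft] at h <;> simp at h
      have := ih hft
      simp only [List.length_cons]
      omega

theorem pvBucketA_of_ne {M : Int} {ivs : List (Int × Int)} {v : Int} (hne : v ≠ M) :
    pvBucketA M ivs v = pvFm ivs v := by
  match ivs with
  | [] => rfl
  | (lo, hi) :: t => simp only [pvBucketA, pvFm, hne, if_false]

theorem pvBucketA_lt {M : Int} {ivs : List (Int × Int)} {v : Int} {j : Nat}
    (h : pvBucketA M ivs v = some j) : j < ivs.length := by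
  match ivs with
  | [] => simp [pvBucketA] at h
  | (lo, hi) :: t =>
    simp only [pvBucketA] at h
    split at h
    · injection h with h; simp [← h]
    · split at h
      · injection h with h; simp [← h]
      · rcases hft : pvFm t v with _ | g <;> rw [hft] at h <;> simp at h
        have := pvFm_lt hft; simp; omega

-- A's inner loop on the tail t with index i, for a non-maximal value, applies the first match
theorem pvLoopA_fm (M v : Int) (hne : v ≠ M) :
    ∀ (t : List (Int × Int)) (i : Nat) (cont : List Int),
      pvLoopA M t i cont v =
        (match pvFm t v with
         | none => cont
         | some k => cont.set (i + k) (cont.getD (i + k) 0 + 1)) := by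
  intro t
  induction t with
  | nil => intro i cont; rfl
  | cons p t ih =>
    intro i cont
    obtain ⟨lo, hi⟩ := p
    simp only [pvLoopA, pvFm]
    by_cases hin : pvIn lo hi v
    · simp [hin]
    · rw [if_neg hin, if_neg hin, if_neg hne, ih (i + 1) cont]
      rcases hft : pvFm t v with _ | g
      · simp [hft]
      · have e : i + 1 + g = i + (g + 1) := by omega
        simp [hft, e]

-- A's inner loop computes exactly pvBucketA
theorem pvLoopA_eq_bucketA (M : Int) (ivs : List (Int × Int)) (cont : List Int) (v : Int)
    (hlen : cont.length = ivs.length) :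
    pvLoopA M ivs 0 cont v =
      (match pvBucketA M ivs v with
       | none => cont
       | some b => cont.set b (cont.getD b 0 + 1)) := by
  match ivs with
  | [] => simp [pvLoopA, pvBucketA]
  | (lo, hi) :: t =>
    simp only [pvLoopA, pvBucketA]
    by_cases hin : pvIn lo hi v
    · simp [hin]
    · rw [if_neg hin, if_neg hin]
      by_cases hmx : v = M
      · simp [hmx, hlen]
      · rw [if_neg hmx, if_neg hmx, pvLoopA_fm M v hmx t 1 cont]
        rcases hft : pvFm t v with _ | g
        · simp [hft]
        · have e : 1 + g = g + 1 := by omega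
          simp [hft, e]

theorem pvLoopA_length (M : Int) (rest : List (Int × Int)) (cont : List Int) (v : Int) :
    ∀ i, (pvLoopA M rest i cont v).length = cont.length := by
  induction rest with
  | nil => intro i; simp [pvLoopA]
  | cons p t ih =>
    intro i
    obtain ⟨lo, hi⟩ := p
    simp only [pvLoopA]
    split
    · simp
    · split
      · simp
      · exact ih (i + 1)

theorem foldA_length (M : Int) (ivs : List (Int × Int)) :
    ∀ (serie : List Int) (cont : List Int),
      (serie.foldl (fun c v => pvLoopA M ivs 0 c v) cont).length = cont.length := by
  intro serie
  induction serie with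
  | nil => intro cont; rfl
  | cons v s ih =>
    intro cont
    simp only [List.foldl_cons]
    rw [ih]
    exact pvLoopA_length M ivs cont v 0

theorem getD_set_lt (l : List Int) (b j : Nat) (x : Int) (hb : b < l.length) :
    (l.set b x).getD j 0 = if b = j then x else l.getD j 0 := by
  simp only [List.getD_eq_getElem?_getD, List.getElem?_set]
  split <;> simp_all

-- entry j of A's fold counts the values whose A-bucket is j
theorem foldA_entry (M : Int) (ivs : List (Int × Int)) :
    ∀ (serie : List Int) (cont : List Int), cont.length = ivs.length →
      ∀ j : Nat, j < ivs.length →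
      (serie.foldl (fun c v => pvLoopA M ivs 0 c v) cont).getD j 0
        = cont.getD j 0 + (serie.countP (fun v => pvBucketA M ivs v == some j) : Int) := by
  intro serie
  induction serie with
  | nil => intro cont _ j _; simp
  | cons v s ih =>
    intro cont hlen j hj
    simp only [List.foldl_cons, List.countP_cons]
    rw [pvLoopA_eq_bucketA M ivs cont v hlen]
    cases hb : pvBucketA M ivs v with
    | none =>
      rw [ih cont hlen j hj]
      simp
    | some b =>
      have hblt : b < ivs.length := pvBucketA_lt hb
      rw [ih (cont.set b (cont.getD b 0 + 1)) (by simp [hlen]) j hj]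
      rw [getD_set_lt cont b j _ (by omega)]
      by_cases hbj : b = j
      · subst hbj; simp; ring
      · simp [hbj]

theorem pvSieve_length (rest : List (Int × Int)) :
    ∀ (i : Nat) (p c : List Int), (pvSieve rest i p c).1.length = c.length := by
  induction rest with
  | nil => intro i p c; rfl
  | cons q t ih =>
    intro i p c
    obtain ⟨lo, hi⟩ := q
    simp only [pvSieve]
    rw [ih]
    simp

theorem pvSieve_pending (rest : List (Int × Int)) :
    ∀ (i : Nat) (p c : List Int),
      (pvSieve rest i p c).2 = p.filter (fun v => pvFm rest v == none) := by
  induction rest with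
  | nil => intro i p c; simp [pvSieve, pvFm]
  | cons q t ih =>
    intro i p c
    obtain ⟨lo, hi⟩ := q
    simp only [pvSieve]
    rw [ih, List.filter_filter]
    congr 1
    funext v
    simp only [pvFm]
    by_cases hin : pvIn lo hi v <;> simp [hin]

theorem pvSieve_counts (rest : List (Int × Int)) :
    ∀ (i : Nat) (p c : List Int), i + rest.length ≤ c.length →
      ∀ j, j < c.length →
      (pvSieve rest i p c).1.getD j 0 =
        if i ≤ j ∧ j < i + rest.length
        then (p.countP (fun v => pvFm rest v == some (j - i)) : Int)
        else c.getD j 0 := by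
  induction rest with
  | nil =>
    intro i p c _ j _
    simp only [pvSieve, List.length_nil, Nat.add_zero]
    rw [if_neg (by omega)]
  | cons q t ih =>
    intro i p c hc j hj
    obtain ⟨lo, hi⟩ := q
    simp only [List.length_cons] at hc
    simp only [pvSieve]
    rw [ih (i + 1) _ _ (by simp; omega) j (by simpa using hj)]
    by_cases h1 : i + 1 ≤ j ∧ j < i + 1 + t.length
    · rw [if_pos h1, if_pos (by simp only [List.length_cons]; omega)]
      rw [List.countP_filter]
      congr 1
      refine List.countP_congr (fun v _ => ?_)
      simp only [pvFm]
      have hji : j - i = (j - (i + 1)) + 1 := by omega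
      by_cases hin : pvIn lo hi v
      · simp [hin, hji]
      · rcases hft : pvFm t v with _ | g
        · simp [hin, hft]
        · simp [hin, hft, hji]
    · rw [if_neg h1, getD_set_lt _ _ _ _ (by omega)]
      by_cases hij : i = j
      · subst hij
        rw [if_pos rfl, if_pos (by simp only [List.length_cons]; omega)]
        have hflen : (((p.filter (fun v => pvIn lo hi v)).length : Nat) : Int)
            = (p.countP (fun v => pvIn lo hi v) : Int) := by
          rw [List.countP_eq_length_filter]
        rw [hflen]
        congr 1
        refine List.countP_congr (fun v _ => ?_)
        simp only [pvFm, Nat.sub_self]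
        by_cases hin : pvIn lo hi v <;> simp [hin]
      · rw [if_neg hij, if_neg (by simp only [List.length_cons]; omega)]

-- counting a conjunction of disjoint cases splits
theorem countP_split (l : List Int) (p q : Int → Bool) :
    l.countP p = l.countP (fun v => p v && q v) + l.countP (fun v => p v && ! q v) := by
  induction l with
  | nil => rfl
  | cons v s ih =>
    simp only [List.countP_cons]
    by_cases hp : p v <;> by_cases hq : q v <;> simp [hp, hq, ih] <;> omega

-- the bucket B assigns: first match, else the last bucket for the maximum
def pvBucketB (M : Int) (ivs : List (Int × Int)) (v : Int) : Option Nat :=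
  match pvFm ivs v with
  | some f => some f
  | none => if v = M then some (ivs.length - 1) else none

theorem bucketA_eq_bucketB (M : Int) (ivs : List (Int × Int)) (lo hi : Int) (t : List (Int × Int))
    (hivs : ivs = (lo, hi) :: t)
    (hnd : ∀ f, pvFm ivs M = some f → f = 0 ∨ f + 1 = ivs.length) :
    ∀ v, pvBucketA M ivs v = pvBucketB M ivs v := by
  intro v
  by_cases hvm : v = M
  · subst hvm
    subst hivs
    by_cases hin : pvIn lo hi v
    · simp [pvBucketA, pvBucketB, pvFm, hin]
    · simp only [pvBucketA, pvBucketB, pvFm, hin, if_false, Bool.false_eq_true, if_true]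
      rcases hft : pvFm t v with _ | g
      · simp
      · simp only [Option.map_some]
        have hfm : pvFm ((lo, hi) :: t) v = some (g + 1) := by
          simp [pvFm, hin, hft]
        have hlt := pvFm_lt hfm
        have : ¬ (g + 1 < ((lo, hi) :: t).length - 1) := by
          intro hglt
          rcases hnd (g + 1) hfm with h | h
          · omega
          · simp only [List.length_cons] at h hglt
            omega
        simp at hlt this ⊢
        omega
  · rw [pvBucketA_of_ne hvm]
    simp [pvBucketB, hvm]
    rcases hft : pvFm ivs v with _ | g <;> simp

theorem countP_bucketB (M : Int) (ivs : List (Int × Int)) (serie : List Int) (j : Nat) :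
    (serie.countP (fun v => pvBucketB M ivs v == some j) : Int)
      = (serie.countP (fun v => pvFm ivs v == some j) : Int)
        + (if ivs.length - 1 = j
           then ((serie.filter (fun v => pvFm ivs v == none)).countP (fun v => v == M) : Int)
           else 0) := by
  rw [countP_split serie (fun v => pvBucketB M ivs v == some j) (fun v => pvFm ivs v == some j)]
  rw [List.countP_filter]
  have e1 : serie.countP (fun v => pvBucketB M ivs v == some j && (pvFm ivs v == some j))
      = serie.countP (fun v => pvFm ivs v == some j) := by
    refine List.countP_congr (fun v _ => ?_)
    simp only [pvBucketB]
    rcases hft : pvFm ivs v with _ | g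
    · by_cases hvm : v = M <;> simp [hft, hvm]
    · by_cases hgj : g = j <;> simp [hft, hgj]
  have e2 : serie.countP (fun v => pvBucketB M ivs v == some j && ! (pvFm ivs v == some j))
      = serie.countP (fun v => ((v == M) && (pvFm ivs v == none)) && decide (ivs.length - 1 = j)) := by
    refine List.countP_congr (fun v _ => ?_)
    simp only [pvBucketB]
    rcases hft : pvFm ivs v with _ | g
    · by_cases hvm : v = M
      · by_cases hj : ivs.length - 1 = j <;> simp [hft, hvm, hj]
      · simp [hft, hvm]
    · by_cases hgj : g = j <;> simp [hft, hgj]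
  rw [e1, e2]
  by_cases hj : ivs.length - 1 = j
  · simp [hj]
  · simp [hj]

-- B's result entry by entry
theorem altB_entry (serie : List Int) (lo hi : Int) (t : List (Int × Int)) (j : Nat)
    (hj : j < ((lo, hi) :: t).length) :
    (contadorIntervalos_alt serie ((lo, hi) :: t)).getD j 0
      = (serie.countP (fun v => pvFm ((lo, hi) :: t) v == some j) : Int)
        + (if ((lo, hi) :: t).length - 1 = j
           then ((serie.filter (fun v => pvFm ((lo, hi) :: t) v == none)).countP
                  (fun v => v == (PySem.List.max? serie (fun y => y)).getD 0) : Int)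
           else 0) := by
  set ivs := (lo, hi) :: t with hivs
  set M := (PySem.List.max? serie (fun y => y)).getD 0 with hM
  have hne : ivs.isEmpty = false := by simp [hivs]
  unfold contadorIntervalos_alt
  rw [← hM]
  simp only [hne, Bool.false_eq_true, if_false]
  have hlen : (pvSieve ivs 0 serie (List.replicate ivs.length (0 : Int))).1.length = ivs.length := by
    rw [pvSieve_length]; simp
  rw [hlen]
  rw [getD_set_lt _ _ _ _ (by omega)]
  rw [pvSieve_counts ivs 0 serie _ (by simp) j (by simpa using hj)]
  rw [pvSieve_counts ivs 0 serie _ (by simp) (ivs.length - 1) (by simp; omega)]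
  rw [pvSieve_pending]
  have hjr : (0 ≤ j ∧ j < 0 + ivs.length) := by omega
  have hlr : (0 ≤ ivs.length - 1 ∧ ivs.length - 1 < 0 + ivs.length) := by
    constructor
    · omega
    · have : 0 < ivs.length := by simp [hivs]
      omega
  rw [if_pos hjr, if_pos hlr]
  by_cases hj1 : ivs.length - 1 = j
  · rw [if_pos hj1, hj1]
    simp
  · rw [if_neg hj1, if_neg hj1]
    simp

theorem max?_mem_of_ne {serie : List Int} (h : serie ≠ []) :
    (PySem.List.max? serie (fun y => y)).getD 0 ∈ serie := by
  rcases hm : PySem.List.max? serie (fun y => y) with _ | m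
  · exact absurd ((PySem.List.max?_eq_none_iff serie (fun y => y)).mp hm) h
  · simpa using PySem.List.max?_mem hm

theorem unchanged_main (serie : List Int) (ivs : List (Int × Int))
    (hpre : serie ≠ []) (hnd : ¬ D_contadorIntervalos serie ivs) :
    contadorIntervalos serie ivs = contadorIntervalos_alt serie ivs := by
  match ivs with
  | [] =>
    unfold contadorIntervalos contadorIntervalos_alt
    simp only [List.length_nil, List.replicate_zero, List.isEmpty_nil, if_true]
    have : ∀ s : List Int, s.foldl
        (fun cont numero => pvLoopA ((PySem.List.max? serie (fun y => y)).getD 0) [] 0 cont numero)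
        ([] : List Int) = [] := by
      intro s
      induction s with
      | nil => rfl
      | cons v t ih => simpa [pvLoopA] using ih
    exact this serie
  | (lo, hi) :: t =>
    set ivs := (lo, hi) :: t with hivs
    set M := (PySem.List.max? serie (fun y => y)).getD 0 with hM
    have hnd' : ∀ f, pvFm ivs M = some f → f = 0 ∨ f + 1 = ivs.length := by
      intro f hf
      by_contra hc
      push_neg at hc
      obtain ⟨hc0, hc1⟩ := hc
      have hflt := pvFm_lt hf
      apply hnd
      unfold D_contadorIntervalos
      rw [maxM_eq, fm_eq_findIdx, ← hM, hf]
      simp only [Option.any_some, decide_eq_true_eq]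
      omega
    apply List.ext_getElem
    · unfold contadorIntervalos
      rw [← hM, foldA_length]
      unfold contadorIntervalos_alt
      rw [← hM]
      simp only [show ivs.isEmpty = false by simp [hivs], Bool.false_eq_true, if_false]
      rw [List.length_set, pvSieve_length]
    · intro j hj1 hj2
      have hjlen : j < ivs.length := by
        unfold contadorIntervalos at hj1
        rw [← hM, foldA_length] at hj1
        simpa using hj1
      have hA : (contadorIntervalos serie ivs).getD j 0
          = (serie.countP (fun v => pvBucketA M ivs v == some j) : Int) := by
        unfold contadorIntervalos
        rw [← hM]
        rw [foldA_entry M ivs serie _ (by simp) j hjlen]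
        rw [List.getD_eq_getElem?_getD]
        simp [List.getElem?_replicate, hjlen]
      have hB := altB_entry serie lo hi t j (by simpa [hivs] using hjlen)
      rw [← hivs, ← hM] at hB
      have hAB : (contadorIntervalos serie ivs).getD j 0 = (contadorIntervalos_alt serie ivs).getD j 0 := by
        rw [hA, hB]
        rw [List.countP_congr (fun v _ => by
          rw [bucketA_eq_bucketB M ivs lo hi t hivs hnd' v])]
        rw [countP_bucketB]
      rw [List.getD_eq_getElem?_getD, List.getD_eq_getElem?_getD] at hAB
      rw [List.getElem?_eq_getElem hj1, List.getElem?_eq_getElem hj2] at hAB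
      simpa using hAB

-- ===== VERDICT (by name: the statement is the Claim_ definition above) =====
theorem contadorIntervalos_spec : Claim_unchanged_contadorIntervalos := by
  intro serie ivs _ hpre
  intro hnd
  exact unchanged_main serie ivs hpre hnd

theorem contadorIntervalos_changed : Claim_changed_contadorIntervalos := by
  unfold Claim_changed_contadorIntervalos; decide

theorem contadorIntervalos_tight : Claim_exact_contadorIntervalos := by
  intro serie ivs _ hpre hd heq
  unfold D_contadorIntervalos at hd
  rw [maxM_eq, fm_eq_findIdx] at hd
  rcases hfm0 : pvFm ivs ((PySem.List.max? serie (fun y => y)).getD 0) with _ | f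
  · rw [hfm0] at hd; simp at hd
  · rw [hfm0] at hd
    simp only [Option.any_some, decide_eq_true_eq] at hd
    obtain ⟨hf0, hflen⟩ := hd
    match ivs, hfm0, hflen, heq with
    | [], hfm0, _, _ => simp [pvFm] at hfm0
    | (lo, hi) :: t, hfm0, hflen, heq =>
    set M := (PySem.List.max? serie (fun y => y)).getD 0 with hM
    have hMmem : M ∈ serie := max?_mem_of_ne hpre
    have hfmM : pvFm ((lo, hi) :: t) M = some f := hfm0
    have h0 : pvIn lo hi M = false := by
      by_contra hc
      have hz : pvFm ((lo, hi) :: t) M = some 0 := by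
        simp [pvFm, (Bool.not_eq_false _).mp hc]
      rw [hz] at hfmM
      injection hfmM with hfmM
      omega
    have hklt : f < t.length := by
      simp only [List.length_cons] at hflen
      omega
    have hjlt : t.length < ((lo, hi) :: t).length := by simp
    have hA : (contadorIntervalos serie ((lo, hi) :: t)).getD t.length 0
        = (serie.countP (fun v => pvBucketA M ((lo, hi) :: t) v == some t.length) : Int) := by
      unfold contadorIntervalos
      rw [← hM, foldA_entry M _ serie _ (by simp) _ hjlt]
      rw [List.getD_eq_getElem?_getD]
      simp [hjlt]
    have hB := altB_entry serie lo hi t t.length hjlt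
    rw [← hM, if_pos (by simp)] at hB
    have eA : serie.countP (fun v => pvBucketA M ((lo, hi) :: t) v == some t.length)
        = serie.countP (fun v => v == M)
          + serie.countP (fun v => (pvFm ((lo, hi) :: t) v == some t.length) && ! (v == M)) := by
      rw [countP_split serie
        (fun v => pvBucketA M ((lo, hi) :: t) v == some t.length) (fun v => v == M)]
      congr 1
      · refine List.countP_congr (fun v _ => ?_)
        by_cases hvm : v = M
        · subst hvm
          simp [pvBucketA, h0]
        · simp [hvm]
      · refine List.countP_congr (fun v _ => ?_)
        by_cases hvm : v = M
        · subst hvm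
          simp
        · rw [pvBucketA_of_ne hvm]
    have eB : serie.countP (fun v => pvFm ((lo, hi) :: t) v == some t.length)
        = serie.countP (fun v => (pvFm ((lo, hi) :: t) v == some t.length) && ! (v == M)) := by
      refine List.countP_congr (fun v _ => ?_)
      by_cases hvm : v = M
      · subst hvm
        have hkne : f ≠ t.length := by omega
        simp [hfmM, hkne]
      · simp [hvm]
    have eC : (serie.filter (fun v => pvFm ((lo, hi) :: t) v == none)).countP
        (fun v => v == M) = 0 := by
      refine List.countP_eq_zero.mpr ?_
      intro v hv
      rw [List.mem_filter] at hv
      by_cases hvm : v = M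
      · subst hvm
        simp [hfmM] at hv
      · simp [hvm]
    have hcnt : 0 < serie.countP (fun v => v == M) :=
      List.countP_pos_iff.mpr ⟨M, hMmem, by simp⟩
    have hgA : (contadorIntervalos serie ((lo, hi) :: t)).getD t.length 0
        = (contadorIntervalos_alt serie ((lo, hi) :: t)).getD t.length 0 := by rw [heq]
    rw [hA, hB, eA, eB, eC] at hgA
    push_cast at hgA
    omega
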